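-- pv_equiv track=rewrite | github.com/miliar/Code_Jam_Webscraper | solutions_python/Problem_155/2166.py | solve
-- ===== SOURCE A (Python) =====
-- def solve(n):
--     acc = 0
--     add = 0
--     for i, x in enumerate(n, 1):
--         acc += x
--         if acc < i:
--             add += i - acc
--             acc = i
--     return add
-- ===== SOURCE B (Python) =====
-- def solve(n):
--     # Stage 1: materialize the true prefix sums.
--     prefixes = []
--     s = 0
--     for x in n:
--         s += x
--         prefixes.append(s)
--     # Stage 2: the answer is max(0, max_i (i - prefix_i)).
--     best = 0
--     for i, p in enumerate(prefixes, 1):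
--         if i - p > best:
--             best = i - p
--     return best
-- ===== Notes on version B (the rewrite author's own statement) =====
-- stated objective: alternative
-- what changed: B works in two staged passes: it first materializes the list of true (unclamped) prefix sums, then scans that list for the maximum deficit i - prefix_i (clamped at 0), instead of A's single loop with a clamp-corrected accumulator and additions counter.
import Mathlib
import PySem

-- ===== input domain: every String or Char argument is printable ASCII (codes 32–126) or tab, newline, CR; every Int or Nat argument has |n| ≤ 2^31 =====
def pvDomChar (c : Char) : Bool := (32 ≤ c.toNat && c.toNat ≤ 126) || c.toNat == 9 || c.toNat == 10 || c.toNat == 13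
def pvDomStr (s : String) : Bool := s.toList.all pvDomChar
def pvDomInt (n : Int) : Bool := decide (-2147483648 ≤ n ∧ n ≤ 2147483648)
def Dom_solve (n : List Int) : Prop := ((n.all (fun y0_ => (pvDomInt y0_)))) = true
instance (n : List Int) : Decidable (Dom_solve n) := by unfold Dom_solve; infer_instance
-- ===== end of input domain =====

-- B replaces A's single clamp-corrected loop by two staged passes: materialize the true
-- prefix sums, then take the maximum deficit i - prefix_i (clamped at 0).

-- ===== PORT A =====
-- state: (acc, add, i); for each x: acc += x; if acc < i then add += i - acc; acc = i
def solveStepA (st : Int × Int × Int) (x : Int) : Int × Int × Int :=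
  let acc := st.1 + x
  let i := st.2.2
  if acc < i then (i, st.2.1 + i - acc, i + 1) else (acc, st.2.1, i + 1)

def solve (n : List Int) : Int := (n.foldl solveStepA (0, 0, 1)).2.1

-- ===== PORT B =====
-- stage 1: s += x; prefixes.append(s)
def solvePrefStep (st : Int × List Int) (x : Int) : Int × List Int :=
  (st.1 + x, st.2 ++ [st.1 + x])

-- stage 2: for i, p in enumerate(prefixes, 1): if i - p > best: best = i - p
def solveBestStep (best : Int) (p : Int × Int) : Int :=
  if p.1 - p.2 > best then p.1 - p.2 else best

def solve_alt (n : List Int) : Int :=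
  let prefixes := (n.foldl solvePrefStep ((0 : Int), ([] : List Int))).2
  (PySem.List.enumerate prefixes 1).foldl solveBestStep 0

-- ===== PRECONDITION & SPEC =====
def Spec_solve (n : List Int) (out : Int) : Prop := out = solve_alt n
instance (n : List Int) (out : Int) : Decidable (Spec_solve n out) := by unfold Spec_solve; infer_instance

-- ===== CLAIM (what is proved, stated in full; the proofs are below) =====
def Claim_equal_solve : Prop := ∀ (n : List Int), Dom_solve n → Spec_solve n (solve n)

-- ===== LEMMAS AND PROOFS =====
-- Proof-side middle ground: the max deficit max(0, max_i (i - prefix_i)) as a recursion.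
def pvDeficit : List Int → Int → Int → Int
  | [], _, _ => 0
  | x :: rest, i, s => max (i - (s + x)) (pvDeficit rest (i + 1) (s + x))

-- the prefix-sum list starting from running sum s
def pvPrefixes : List Int → Int → List Int
  | [], _ => []
  | x :: rest, s => (s + x) :: pvPrefixes rest (s + x)

lemma prefFold : ∀ (n : List Int) (s : Int) (acc : List Int),
    n.foldl solvePrefStep (s, acc) = (s + n.sum, acc ++ pvPrefixes n s) := by
  intro n
  induction n with
  | nil => intro s acc; simp [pvPrefixes]
  | cons x t ih =>
    intro s acc
    simp only [List.foldl_cons, solvePrefStep, pvPrefixes, List.sum_cons]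
    rw [ih (s + x) (acc ++ [s + x])]
    simp only [Prod.mk.injEq, List.append_assoc, List.cons_append, List.nil_append]
    constructor
    · ring
    · trivial

-- A's loop invariant: its state is (s + add, add, i) where s is the true prefix sum, and
-- its additions counter folds the running max of the deficits seen so far.
lemma fold_keyA : ∀ (t : List Int) (s add i : Int), 0 ≤ add →
    (t.foldl solveStepA (s + add, add, i)).2.1 = max add (pvDeficit t i s) := by
  intro t
  induction t with
  | nil => intro s add i h; simp [pvDeficit]; omega
  | cons x rest ih =>
    intro s add i h
    simp only [List.foldl_cons, pvDeficit]
    by_cases hc : s + add + x < i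
    · have hstep : solveStepA (s + add, add, i) x
          = ((s + x) + (i - (s + x)), i - (s + x), i + 1) := by
        simp only [solveStepA]
        split_ifs <;> simp only [Prod.mk.injEq, and_true] <;> omega
      rw [hstep, ih (s + x) (i - (s + x)) (i + 1) (by omega)]
      omega
    · have hstep : solveStepA (s + add, add, i) x
          = ((s + x) + add, add, i + 1) := by
        simp only [solveStepA]
        split_ifs <;> simp only [Prod.mk.injEq, and_true] <;> omega
      rw [hstep, ih (s + x) add (i + 1) h]
      omega

-- B's second pass folds the same running max over the enumerated prefix list.
lemma fold_keyB : ∀ (t : List Int) (s i best : Int), 0 ≤ best →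
    (PySem.List.enumerate (pvPrefixes t s) i).foldl solveBestStep best
      = max best (pvDeficit t i s) := by
  intro t
  induction t with
  | nil => intro s i best h; simp [pvPrefixes, pvDeficit]; omega
  | cons x rest ih =>
    intro s i best h
    simp only [pvPrefixes, pvDeficit, PySem.List.enumerate_cons, List.foldl_cons]
    rw [show solveBestStep best (i, s + x)
        = max best (i - (s + x)) from by simp only [solveBestStep]; split_ifs <;> omega]
    rw [ih (s + x) (i + 1) (max best (i - (s + x))) (by omega)]
    omega

-- ===== VERDICT (by name: the statement is the Claim_ definition above) =====
theorem solve_spec : Claim_equal_solve := by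
  intro n _
  unfold Spec_solve solve solve_alt
  have hA := fold_keyA n 0 0 1 le_rfl
  simp only [add_zero] at hA
  rw [hA]
  have hP := prefFold n 0 []
  simp only [zero_add, List.nil_append] at hP
  rw [hP]
  exact (fold_keyB n 0 1 0 le_rfl).symm
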